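-- pv_equiv track=rewrite | github.com/verba-neo/multi-it-ai-2 | p121683-외톨이알파벳/진홍구.py | solution
-- ===== SOURCE A (Python) =====
-- def solution(input_string):
--     # 출력값 초기화
--     answer = ''
--     # 입력값 list로 만들기
--     letter_lists = list(input_string)
--     # 출력값이 오름차순이어야 하므로, set -> 오름차순으로 정렬함
--     letter_list_only = sorted(set(letter_lists))
--
--     for letter in letter_list_only:
--         solo_letter = 0
--         for i in range(0, len(letter_lists)):
--             if letter == letter_lists[i] and solo_letter == 0:
--                 for j in range(i + 1, len(letter_lists)):
--                     if letter != letter_lists[j] and solo_letter == 0: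
--                         for k in range(j + 1, len(letter_lists)):
--                             if letter == letter_lists[k] and solo_letter == 0:
--                                 solo_letter += 1
--                                 answer += letter
--     if answer == '':
--         answer ='N'
--     return answer
-- ===== SOURCE B (Python) =====
-- def solution(input_string):
--     # compress into runs: one representative per maximal block of equal chars
--     runs = []
--     prev = None
--     for ch in input_string:
--         if ch != prev:
--             runs.append(ch)
--             prev = ch
--     # a letter is "alone" if it heads more than one run
--     seen = set()
--     multi = set()
--     for ch in runs:
--         if ch in seen:
--             multi.add(ch)
--         else:
--             seen.add(ch)
--     return ''.join(sorted(multi)) or 'N'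
-- ===== Notes on version B (the rewrite author's own statement) =====
-- stated objective: faster
-- what changed: Replaces the quadruple nested index scan per distinct letter with a single pass that compresses the string into runs and collects letters heading more than one run, then sorts once.
import Mathlib
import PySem

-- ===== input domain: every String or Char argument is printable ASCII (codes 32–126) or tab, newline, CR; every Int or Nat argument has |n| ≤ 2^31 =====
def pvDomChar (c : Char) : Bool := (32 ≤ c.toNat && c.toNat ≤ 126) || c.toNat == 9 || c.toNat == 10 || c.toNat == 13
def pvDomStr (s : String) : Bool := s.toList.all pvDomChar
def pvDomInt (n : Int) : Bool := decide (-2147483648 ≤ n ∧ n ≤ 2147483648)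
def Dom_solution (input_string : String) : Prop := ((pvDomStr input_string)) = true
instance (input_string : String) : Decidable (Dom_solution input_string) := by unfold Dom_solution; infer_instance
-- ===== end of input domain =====

-- B replaces A's quadruple nested index scan per distinct letter by a single pass
-- compressing the string into runs and collecting letters that head more than one run.

-- ===== PORT A =====
-- literal transliteration of A: for each sorted distinct letter, the i/j/k index
-- loops with the solo_letter flag; answer is carried as a list of chars.
def solution (input_string : String) : String :=
  let letter_lists : List Char := input_string.toList
  let n : Int := (letter_lists.length : Int)
  let letter_list_only := PySem.List.sorted (PySem.Set.ofList letter_lists) (fun x => x) false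
  let answer : List Char := letter_list_only.foldl (fun answer letter =>
    ((PySem.List.pyRange 0 n 1).foldl (fun st i =>
      if letter == PySem.List.pyGetD letter_lists i ' ' && st.1 == 0 then
        (PySem.List.pyRange (i + 1) n 1).foldl (fun st j =>
          if letter != PySem.List.pyGetD letter_lists j ' ' && st.1 == 0 then
            (PySem.List.pyRange (j + 1) n 1).foldl (fun st k =>
              if letter == PySem.List.pyGetD letter_lists k ' ' && st.1 == 0 then
                (st.1 + 1, st.2 ++ [letter])
              else st) st
          else st) st
      else st) ((0 : Int), answer)).2) []
  if answer = [] then "N" else String.mk answer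

-- ===== PORT B =====
-- literal transliteration of Source B: run compression, then seen/multi sets, then sort.
def solution_alt (input_string : String) : String :=
  let rp : List Char × Option Char := input_string.toList.foldl
    (fun (st : List Char × Option Char) ch =>
      if some ch != st.2 then (st.1 ++ [ch], some ch) else st) ([], none)
  let runs : List Char := rp.1
  let sm : PySem.Set Char × PySem.Set Char := runs.foldl
    (fun (st : PySem.Set Char × PySem.Set Char) ch =>
      if PySem.Set.contains st.1 ch then (st.1, PySem.Set.add st.2 ch)
      else (PySem.Set.add st.1 ch, st.2)) (PySem.Set.empty, PySem.Set.empty)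
  let res : List Char := PySem.List.sorted sm.2 (fun x => x) false
  if res = [] then "N" else String.mk res

-- ===== PRECONDITION & SPEC =====
def Spec_solution (input_string : String) (out : String) : Prop := out = solution_alt input_string
instance (input_string : String) (out : String) : Decidable (Spec_solution input_string out) := by unfold Spec_solution; infer_instance

-- ===== CLAIM (what is proved, stated in full; the proofs are below) =====
def Claim_equal_solution : Prop := ∀ (input_string : String), Dom_solution input_string → Spec_solution input_string (solution input_string)

-- ===== LEMMAS AND PROOFS =====

-- "a non-ch element is later followed by ch" (pattern of A's j/k loops)
def w2 (ch : Char) : List Char → Bool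
  | [] => false
  | x :: xs => (decide (x ≠ ch) && xs.contains ch) || w2 ch xs

-- "ch, then a non-ch, then ch again" (pattern of A's i/j/k loops)
def w1 (ch : Char) : List Char → Bool
  | [] => false
  | x :: xs => (decide (x = ch) && w2 ch xs) || w1 ch xs

-- run compression, recursively (proof-side mirror of B's first loop)
def runsRec (prev : Option Char) : List Char → List Char
  | [] => []
  | x :: xs => if some x = prev then runsRec prev xs else x :: runsRec (some x) xs


-- w1 / w2 / membership implications
theorem w2_imp_mem (ch : Char) (l : List Char) (h : w2 ch l = true) : ch ∈ l := by
  induction l with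
  | nil => simp [w2] at h
  | cons x xs ih =>
    simp only [w2, Bool.or_eq_true, Bool.and_eq_true, decide_eq_true_eq,
      List.contains_iff_mem] at h
    rcases h with ⟨_, h⟩ | h
    · exact List.mem_cons_of_mem _ h
    · exact List.mem_cons_of_mem _ (ih h)

theorem w1_imp_w2 (ch : Char) (l : List Char) (h : w1 ch l = true) : w2 ch l = true := by
  induction l with
  | nil => simp [w1] at h
  | cons x xs ih =>
    simp only [w1, Bool.or_eq_true, Bool.and_eq_true, decide_eq_true_eq] at h
    simp only [w2, Bool.or_eq_true]
    rcases h with ⟨_, h⟩ | h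
    · right; exact h
    · right; exact ih h

theorem w1_imp_mem (ch : Char) (l : List Char) (h : w1 ch l = true) : ch ∈ l := by
  induction l with
  | nil => simp [w1] at h
  | cons x xs ih =>
    simp only [w1, Bool.or_eq_true, Bool.and_eq_true, decide_eq_true_eq] at h
    rcases h with ⟨h, _⟩ | h
    · exact h ▸ List.mem_cons_self
    · exact List.mem_cons_of_mem _ (ih h)

-- ===== level-3 (k-loop) characterization =====
theorem l3_stop (ch : Char) (l : List Char) (ks : List Int) (st : Int × List Char)
    (h : ¬ st.1 = 0) :
    ks.foldl (fun st k =>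
      if ch == PySem.List.pyGetD l k ' ' && st.1 == 0 then (st.1 + 1, st.2 ++ [ch]) else st) st
      = st := by
  induction ks generalizing st with
  | nil => rfl
  | cons k ks ih =>
    simp only [List.foldl_cons]
    rw [if_neg (by simp [h]), ih st h]

theorem l3_run (ch : Char) (l : List Char) (ks : List Int) (st : Int × List Char)
    (h : st.1 = 0) :
    ks.foldl (fun st k =>
      if ch == PySem.List.pyGetD l k ' ' && st.1 == 0 then (st.1 + 1, st.2 ++ [ch]) else st) st
      = if ∃ k ∈ ks, PySem.List.pyGetD l k ' ' = ch then (1, st.2 ++ [ch]) else st := by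
  induction ks generalizing st with
  | nil => simp
  | cons k ks ih =>
    simp only [List.foldl_cons]
    by_cases hk : PySem.List.pyGetD l k ' ' = ch
    · rw [if_pos (by simp [hk, h])]
      rw [l3_stop ch l ks _ (by simp [h])]
      rw [if_pos ⟨k, List.mem_cons_self, hk⟩]
      simp [h]
    · rw [if_neg (by simp [Ne.symm hk]), ih st h]
      by_cases he : ∃ k ∈ ks, PySem.List.pyGetD l k ' ' = ch
      · rw [if_pos he, if_pos (by rcases he with ⟨k', hm, hv⟩; exact ⟨k', List.mem_cons_of_mem _ hm, hv⟩)]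
      · rw [if_neg he, if_neg (by rw [List.exists_mem_cons_iff]; rintro (hv | he'); exacts [hk hv, he he'])]

-- ===== level-2 (j-loop) characterization =====
theorem l2_stop (ch : Char) (l : List Char) (n : Int) (js : List Int) (st : Int × List Char)
    (h : ¬ st.1 = 0) :
    js.foldl (fun st j =>
      if ch != PySem.List.pyGetD l j ' ' && st.1 == 0 then
        (PySem.List.pyRange (j + 1) n 1).foldl (fun st k =>
          if ch == PySem.List.pyGetD l k ' ' && st.1 == 0 then (st.1 + 1, st.2 ++ [ch]) else st) st
      else st) st = st := by
  induction js generalizing st with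
  | nil => rfl
  | cons j js ih =>
    simp only [List.foldl_cons]
    rw [if_neg (by simp [h]), ih st h]

theorem l2_run (ch : Char) (l : List Char) (n : Int) (js : List Int) (st : Int × List Char)
    (h : st.1 = 0) :
    js.foldl (fun st j =>
      if ch != PySem.List.pyGetD l j ' ' && st.1 == 0 then
        (PySem.List.pyRange (j + 1) n 1).foldl (fun st k =>
          if ch == PySem.List.pyGetD l k ' ' && st.1 == 0 then (st.1 + 1, st.2 ++ [ch]) else st) st
      else st) st
      = if ∃ j ∈ js, PySem.List.pyGetD l j ' ' ≠ ch ∧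
            ∃ k ∈ PySem.List.pyRange (j + 1) n 1, PySem.List.pyGetD l k ' ' = ch then
          (1, st.2 ++ [ch]) else st := by
  induction js generalizing st with
  | nil => simp
  | cons j js ih =>
    simp only [List.foldl_cons]
    by_cases hj : PySem.List.pyGetD l j ' ' = ch
    · rw [if_neg (by simp [h, hj]), ih st h]
      by_cases he : ∃ j' ∈ js, PySem.List.pyGetD l j' ' ' ≠ ch ∧
          ∃ k ∈ PySem.List.pyRange (j' + 1) n 1, PySem.List.pyGetD l k ' ' = ch
      · rw [if_pos he, if_pos (by rcases he with ⟨j', hm, hv⟩; exact ⟨j', List.mem_cons_of_mem _ hm, hv⟩)]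
      · rw [if_neg he, if_neg (by rw [List.exists_mem_cons_iff]; rintro (⟨hne, _⟩ | he'); exacts [hne hj, he he'])]
    · rw [if_pos (by simp [h, Ne.symm hj])]
      rw [l3_run ch l _ st h]
      by_cases hk : ∃ k ∈ PySem.List.pyRange (j + 1) n 1, PySem.List.pyGetD l k ' ' = ch
      · rw [if_pos hk, l2_stop ch l n js _ (by simp)]
        rw [if_pos ⟨j, List.mem_cons_self, hj, hk⟩]
      · rw [if_neg hk, ih st h]
        by_cases he : ∃ j' ∈ js, PySem.List.pyGetD l j' ' ' ≠ ch ∧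
            ∃ k ∈ PySem.List.pyRange (j' + 1) n 1, PySem.List.pyGetD l k ' ' = ch
        · rw [if_pos he, if_pos (by rcases he with ⟨j', hm, hv⟩; exact ⟨j', List.mem_cons_of_mem _ hm, hv⟩)]
        · rw [if_neg he, if_neg (by rw [List.exists_mem_cons_iff]; rintro (⟨_, hk'⟩ | he'); exacts [hk hk', he he'])]

-- ===== level-1 (i-loop) characterization =====
theorem l1_stop (ch : Char) (l : List Char) (n : Int) (is : List Int) (st : Int × List Char)
    (h : ¬ st.1 = 0) :
    is.foldl (fun st i =>
      if ch == PySem.List.pyGetD l i ' ' && st.1 == 0 then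
        (PySem.List.pyRange (i + 1) n 1).foldl (fun st j =>
          if ch != PySem.List.pyGetD l j ' ' && st.1 == 0 then
            (PySem.List.pyRange (j + 1) n 1).foldl (fun st k =>
              if ch == PySem.List.pyGetD l k ' ' && st.1 == 0 then (st.1 + 1, st.2 ++ [ch]) else st) st
          else st) st
      else st) st = st := by
  induction is generalizing st with
  | nil => rfl
  | cons i is ih =>
    simp only [List.foldl_cons]
    rw [if_neg (by simp [h]), ih st h]

theorem l1_run (ch : Char) (l : List Char) (n : Int) (is : List Int) (st : Int × List Char)
    (h : st.1 = 0) :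
    is.foldl (fun st i =>
      if ch == PySem.List.pyGetD l i ' ' && st.1 == 0 then
        (PySem.List.pyRange (i + 1) n 1).foldl (fun st j =>
          if ch != PySem.List.pyGetD l j ' ' && st.1 == 0 then
            (PySem.List.pyRange (j + 1) n 1).foldl (fun st k =>
              if ch == PySem.List.pyGetD l k ' ' && st.1 == 0 then (st.1 + 1, st.2 ++ [ch]) else st) st
          else st) st
      else st) st
      = if ∃ i ∈ is, PySem.List.pyGetD l i ' ' = ch ∧
            ∃ j ∈ PySem.List.pyRange (i + 1) n 1, PySem.List.pyGetD l j ' ' ≠ ch ∧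
              ∃ k ∈ PySem.List.pyRange (j + 1) n 1, PySem.List.pyGetD l k ' ' = ch then
          (1, st.2 ++ [ch]) else st := by
  induction is generalizing st with
  | nil => simp
  | cons i is ih =>
    simp only [List.foldl_cons]
    by_cases hi : PySem.List.pyGetD l i ' ' = ch
    · rw [if_pos (by simp [h, hi])]
      rw [l2_run ch l n _ st h]
      by_cases hjk : ∃ j ∈ PySem.List.pyRange (i + 1) n 1, PySem.List.pyGetD l j ' ' ≠ ch ∧
          ∃ k ∈ PySem.List.pyRange (j + 1) n 1, PySem.List.pyGetD l k ' ' = ch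
      · rw [if_pos hjk, l1_stop ch l n is _ (by simp)]
        rw [if_pos ⟨i, List.mem_cons_self, hi, hjk⟩]
      · rw [if_neg hjk, ih st h]
        by_cases he : ∃ i' ∈ is, PySem.List.pyGetD l i' ' ' = ch ∧
            ∃ j ∈ PySem.List.pyRange (i' + 1) n 1, PySem.List.pyGetD l j ' ' ≠ ch ∧
              ∃ k ∈ PySem.List.pyRange (j + 1) n 1, PySem.List.pyGetD l k ' ' = ch
        · rw [if_pos he, if_pos (by rcases he with ⟨i', hm, hv⟩; exact ⟨i', List.mem_cons_of_mem _ hm, hv⟩)]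
        · rw [if_neg he, if_neg (by rw [List.exists_mem_cons_iff]; rintro (⟨_, hjk'⟩ | he'); exacts [hjk hjk', he he'])]
    · rw [if_neg (by simp [Ne.symm hi]), ih st h]
      by_cases he : ∃ i' ∈ is, PySem.List.pyGetD l i' ' ' = ch ∧
          ∃ j ∈ PySem.List.pyRange (i' + 1) n 1, PySem.List.pyGetD l j ' ' ≠ ch ∧
            ∃ k ∈ PySem.List.pyRange (j + 1) n 1, PySem.List.pyGetD l k ' ' = ch
      · rw [if_pos he, if_pos (by rcases he with ⟨i', hm, hv⟩; exact ⟨i', List.mem_cons_of_mem _ hm, hv⟩)]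
      · rw [if_neg he, if_neg (by rw [List.exists_mem_cons_iff]; rintro (⟨hi', _⟩ | he'); exacts [hi hi', he he'])]

-- ===== bridging the index existentials to w1/w2 on suffixes =====
theorem e3_iff (ch : Char) (l : List Char) (a : Nat) :
    (∃ k ∈ PySem.List.pyRange (a : Int) (l.length : Int) 1, PySem.List.pyGetD l k ' ' = ch)
      ↔ ch ∈ l.drop a := by
  constructor
  · rintro ⟨k, hk, hget⟩
    rw [PySem.List.mem_pyRange_one] at hk
    obtain ⟨h1, h2⟩ := hk
    rw [PySem.List.pyGetD_eq_getElem l ' ' (by omega) h2] at hget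
    have ha : a ≤ k.toNat := by omega
    have hlt : k.toNat - a < (l.drop a).length := by simp [List.length_drop]; omega
    refine List.mem_iff_getElem.mpr ⟨k.toNat - a, hlt, ?_⟩
    rw [List.getElem_drop]
    rw [← hget]
    congr 1
    omega
  · intro hm
    obtain ⟨m, hm1, hm2⟩ := List.mem_iff_getElem.mp hm
    rw [List.getElem_drop] at hm2
    have hlen : a + m < l.length := by simp [List.length_drop] at hm1; omega
    refine ⟨((a + m : Nat) : Int), ?_, ?_⟩
    · rw [PySem.List.mem_pyRange_one]; constructor <;> [omega; exact_mod_cast Nat.cast_lt.mpr hlen]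
    · rw [PySem.List.pyGetD_eq_getElem l ' ' (by omega) (by exact_mod_cast hlen)]
      simpa using hm2

theorem e2_iff (ch : Char) (l : List Char) (a : Nat) :
    (∃ j ∈ PySem.List.pyRange (a : Int) (l.length : Int) 1, PySem.List.pyGetD l j ' ' ≠ ch ∧
        ∃ k ∈ PySem.List.pyRange (j + 1) (l.length : Int) 1, PySem.List.pyGetD l k ' ' = ch)
      ↔ w2 ch (l.drop a) = true := by
  induction hfuel : l.length - a generalizing a with
  | zero =>
    have hge : l.length ≤ a := by omega
    rw [List.drop_eq_nil_of_le hge, PySem.List.pyRange_one_eq_nil (by exact_mod_cast Nat.cast_le.mpr hge)]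
    simp [w2]
  | succ f ih =>
    have hlt : a < l.length := by omega
    rw [List.drop_eq_getElem_cons hlt]
    rw [PySem.List.pyRange_one_cons (by exact_mod_cast Nat.cast_lt.mpr hlt)]
    have hcast : ((a : Int) + 1) = ((a + 1 : Nat) : Int) := by push_cast; ring
    constructor
    · rintro ⟨j, hj, hne, hk⟩
      rcases List.mem_cons.mp hj with rfl | hj'
      · -- j = a
        rw [PySem.List.pyGetD_eq_getElem l ' ' (by omega) (by exact_mod_cast Nat.cast_lt.mpr hlt)] at hne
        rw [hcast] at hk
        have hk' := (e3_iff ch l (a + 1)).mp hk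
        simp only [w2, Bool.or_eq_true, Bool.and_eq_true, decide_eq_true_eq, List.contains_iff_mem]
        left
        exact ⟨by simpa using hne, hk'⟩
      · have : ∃ j' ∈ PySem.List.pyRange ((a + 1 : Nat) : Int) (l.length : Int) 1,
            PySem.List.pyGetD l j' ' ' ≠ ch ∧
            ∃ k ∈ PySem.List.pyRange (j' + 1) (l.length : Int) 1, PySem.List.pyGetD l k ' ' = ch := by
          refine ⟨j, by rw [← hcast]; exact hj', hne, hk⟩
        have := (ih (a + 1) (by omega)).mp this
        simp only [w2, Bool.or_eq_true]
        right; exact this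
    · intro hw
      simp only [w2, Bool.or_eq_true, Bool.and_eq_true, decide_eq_true_eq, List.contains_iff_mem] at hw
      rcases hw with ⟨hne, hmem⟩ | hw
      · refine ⟨(a : Int), List.mem_cons_self, ?_, ?_⟩
        · rw [PySem.List.pyGetD_eq_getElem l ' ' (by omega) (by exact_mod_cast Nat.cast_lt.mpr hlt)]
          simpa using hne
        · rw [hcast]; exact (e3_iff ch l (a + 1)).mpr hmem
      · obtain ⟨j, hj, hv⟩ := (ih (a + 1) (by omega)).mpr hw
        exact ⟨j, List.mem_cons_of_mem _ (by rw [hcast]; exact hj), hv⟩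

theorem e1_iff (ch : Char) (l : List Char) (a : Nat) :
    (∃ i ∈ PySem.List.pyRange (a : Int) (l.length : Int) 1, PySem.List.pyGetD l i ' ' = ch ∧
        ∃ j ∈ PySem.List.pyRange (i + 1) (l.length : Int) 1, PySem.List.pyGetD l j ' ' ≠ ch ∧
          ∃ k ∈ PySem.List.pyRange (j + 1) (l.length : Int) 1, PySem.List.pyGetD l k ' ' = ch)
      ↔ w1 ch (l.drop a) = true := by
  induction hfuel : l.length - a generalizing a with
  | zero =>
    have hge : l.length ≤ a := by omega
    rw [List.drop_eq_nil_of_le hge, PySem.List.pyRange_one_eq_nil (by exact_mod_cast Nat.cast_le.mpr hge)]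
    simp [w1]
  | succ f ih =>
    have hlt : a < l.length := by omega
    rw [List.drop_eq_getElem_cons hlt]
    rw [PySem.List.pyRange_one_cons (by exact_mod_cast Nat.cast_lt.mpr hlt)]
    have hcast : ((a : Int) + 1) = ((a + 1 : Nat) : Int) := by push_cast; ring
    constructor
    · rintro ⟨i, hi, heq, hjk⟩
      rcases List.mem_cons.mp hi with rfl | hi'
      · rw [PySem.List.pyGetD_eq_getElem l ' ' (by omega) (by exact_mod_cast Nat.cast_lt.mpr hlt)] at heq
        rw [hcast] at hjk
        have hjk' := (e2_iff ch l (a + 1)).mp hjk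
        simp only [w1, Bool.or_eq_true, Bool.and_eq_true, decide_eq_true_eq]
        left
        exact ⟨by simpa using heq, hjk'⟩
      · have : ∃ i' ∈ PySem.List.pyRange ((a + 1 : Nat) : Int) (l.length : Int) 1,
            PySem.List.pyGetD l i' ' ' = ch ∧
            ∃ j ∈ PySem.List.pyRange (i' + 1) (l.length : Int) 1, PySem.List.pyGetD l j ' ' ≠ ch ∧
              ∃ k ∈ PySem.List.pyRange (j + 1) (l.length : Int) 1, PySem.List.pyGetD l k ' ' = ch := by
          refine ⟨i, by rw [← hcast]; exact hi', heq, hjk⟩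
        have := (ih (a + 1) (by omega)).mp this
        simp only [w1, Bool.or_eq_true]
        right; exact this
    · intro hw
      simp only [w1, Bool.or_eq_true, Bool.and_eq_true, decide_eq_true_eq] at hw
      rcases hw with ⟨heq, hw2⟩ | hw
      · refine ⟨(a : Int), List.mem_cons_self, ?_, ?_⟩
        · rw [PySem.List.pyGetD_eq_getElem l ' ' (by omega) (by exact_mod_cast Nat.cast_lt.mpr hlt)]
          simpa using heq
        · rw [hcast]; exact (e2_iff ch l (a + 1)).mpr hw2
      · obtain ⟨i, hi, hv⟩ := (ih (a + 1) (by omega)).mpr hw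
        exact ⟨i, List.mem_cons_of_mem _ (by rw [hcast]; exact hi), hv⟩

-- ===== A's outer loop = filter by w1 =====
theorem outer_loop (l : List Char) (cs : List Char) (acc : List Char) :
    cs.foldl (fun answer letter =>
      ((PySem.List.pyRange 0 (l.length : Int) 1).foldl (fun st i =>
        if letter == PySem.List.pyGetD l i ' ' && st.1 == 0 then
          (PySem.List.pyRange (i + 1) (l.length : Int) 1).foldl (fun st j =>
            if letter != PySem.List.pyGetD l j ' ' && st.1 == 0 then
              (PySem.List.pyRange (j + 1) (l.length : Int) 1).foldl (fun st k =>
                if letter == PySem.List.pyGetD l k ' ' && st.1 == 0 then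
                  (st.1 + 1, st.2 ++ [letter])
                else st) st
            else st) st
        else st) ((0 : Int), answer)).2) acc
      = acc ++ cs.filter (fun ch => w1 ch l) := by
  induction cs generalizing acc with
  | nil => simp
  | cons c cs ih =>
    simp only [List.foldl_cons, List.filter_cons]
    rw [l1_run c l (l.length : Int) _ _ rfl]
    have hiff := e1_iff c l 0
    simp only [Nat.cast_zero, List.drop_zero] at hiff
    by_cases hw : w1 c l = true
    · rw [if_pos (hiff.mpr hw), hw]
      simp only []
      rw [ih]
      simp
    · rw [if_neg (fun he => hw (hiff.mp he))]
      simp only [Bool.not_eq_true] at hw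
      rw [hw]
      simp only []
      rw [ih]
      simp

-- ===== B's first loop = runsRec =====
theorem runs_fold (xs : List Char) (acc : List Char) (prev : Option Char) :
    (xs.foldl (fun (st : List Char × Option Char) ch =>
      if some ch != st.2 then (st.1 ++ [ch], some ch) else st) (acc, prev)).1
      = acc ++ runsRec prev xs := by
  induction xs generalizing acc prev with
  | nil => simp [runsRec]
  | cons x xs ih =>
    simp only [List.foldl_cons, runsRec]
    by_cases hx : some x = prev
    · rw [if_neg (by simp [hx]), if_pos hx, ih]
    · rw [if_pos (by simp [hx]), if_neg hx, ih]
      simp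

-- ===== B's second loop: seen/multi invariant =====
theorem sm_fold (p : List Char) :
    (p.foldl (fun (st : PySem.Set Char × PySem.Set Char) ch =>
        if PySem.Set.contains st.1 ch then (st.1, PySem.Set.add st.2 ch)
        else (PySem.Set.add st.1 ch, st.2)) (PySem.Set.empty, PySem.Set.empty)).1
        = PySem.Set.ofList p
    ∧ (p.foldl (fun (st : PySem.Set Char × PySem.Set Char) ch =>
        if PySem.Set.contains st.1 ch then (st.1, PySem.Set.add st.2 ch)
        else (PySem.Set.add st.1 ch, st.2)) (PySem.Set.empty, PySem.Set.empty)).2.Nodup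
    ∧ ∀ x, x ∈ (p.foldl (fun (st : PySem.Set Char × PySem.Set Char) ch =>
        if PySem.Set.contains st.1 ch then (st.1, PySem.Set.add st.2 ch)
        else (PySem.Set.add st.1 ch, st.2)) (PySem.Set.empty, PySem.Set.empty)).2
        ↔ 2 ≤ p.count x := by
  induction p using List.reverseRecOn with
  | nil => simp [PySem.Set.empty]
  | append_singleton q x ih =>
    obtain ⟨ih1, ih2, ih3⟩ := ih
    rw [List.foldl_append] at *
    simp only [List.foldl_cons, List.foldl_nil]
    by_cases hx : x ∈ (q.foldl (fun (st : PySem.Set Char × PySem.Set Char) ch =>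
        if PySem.Set.contains st.1 ch then (st.1, PySem.Set.add st.2 ch)
        else (PySem.Set.add st.1 ch, st.2)) (PySem.Set.empty, PySem.Set.empty)).1
    · rw [if_pos ((PySem.Set.contains_iff _ _).mpr hx)]
      have hxq : x ∈ q := by rwa [ih1, PySem.Set.mem_ofList] at hx
      have hcnt : 1 ≤ q.count x := List.one_le_count_iff.mpr hxq
      have hxo : x ∈ PySem.Set.ofList q := ih1 ▸ hx
      refine ⟨by rw [ih1, PySem.Set.ofList_append_singleton]
                 simp [PySem.Set.add, PySem.Set.contains, hxq], ?_, ?_⟩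
      · exact PySem.Set.nodup_add _ _ ih2
      · intro y
        rw [PySem.Set.mem_add, ih3, List.count_append]
        by_cases hy : y = x
        · subst hy; simp; omega
        · simp [Ne.symm hy]
          exact fun h => absurd h hy
    · rw [if_neg (by rw [PySem.Set.contains_iff]; exact hx)]
      have hxq : x ∉ q := by rwa [ih1, PySem.Set.mem_ofList] at hx
      have hcnt : q.count x = 0 := List.count_eq_zero.mpr hxq
      refine ⟨by rw [PySem.Set.ofList_append_singleton, ih1], ih2, ?_⟩
      intro y
      rw [ih3, List.count_append]
      by_cases hy : y = x
      · subst hy; simp [hcnt]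
      · simp [Ne.symm hy]

-- ===== runs count vs w1/w2 =====
theorem wcnt (ch : Char) (l : List Char) :
    (∀ prev, prev ≠ some ch →
      ((2 ≤ (runsRec prev l).count ch ↔ w1 ch l = true) ∧
       (1 ≤ (runsRec prev l).count ch ↔ ch ∈ l)))
    ∧ (1 ≤ (runsRec (some ch) l).count ch ↔ w2 ch l = true) := by
  induction l with
  | nil => simp [runsRec, w1, w2]
  | cons x xs ih =>
    obtain ⟨ih1, ih2⟩ := ih
    constructor
    · intro prev hprev
      by_cases hxp : some x = prev
      · -- skip: x equals prev, and x ≠ ch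
        have hxch : x ≠ ch := by intro h; exact hprev (h ▸ hxp.symm)
        rw [runsRec, if_pos hxp]
        constructor
        · rw [(ih1 prev hprev).1]
          simp [w1, hxch]
        · rw [(ih1 prev hprev).2]
          simp [List.mem_cons, Ne.symm hxch]
      · rw [runsRec, if_neg hxp]
        by_cases hxch : x = ch
        · subst hxch
          rw [List.count_cons_self]
          constructor
          · constructor
            · intro h
              have : 1 ≤ (runsRec (some x) xs).count x := by omega
              have hw2 := ih2.mp this
              simp [w1, hw2]
            · intro h
              simp only [w1, Bool.or_eq_true, Bool.and_eq_true, decide_eq_true_eq] at h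
              rcases h with ⟨_, hw2⟩ | hw1
              · have := ih2.mpr hw2; omega
              · have := ih2.mpr (w1_imp_w2 x xs hw1); omega
          · constructor
            · intro _; exact List.mem_cons_self
            · intro _; omega
        · rw [List.count_cons_of_ne hxch]
          have hne : some x ≠ some ch := by simpa using hxch
          constructor
          · rw [(ih1 (some x) hne).1]
            simp [w1, hxch]
          · rw [(ih1 (some x) hne).2]
            simp [List.mem_cons, Ne.symm hxch]
    · by_cases hxch : x = ch
      · subst hxch
        rw [runsRec, if_pos rfl]
        rw [ih2]
        simp [w2]
      · rw [runsRec, if_neg (by simpa using hxch)]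
        rw [List.count_cons_of_ne hxch]
        have hne : some x ≠ some ch := by simpa using hxch
        rw [(ih1 (some x) hne).2]
        constructor
        · intro hm
          simp only [w2, Bool.or_eq_true, Bool.and_eq_true, decide_eq_true_eq, List.contains_iff_mem]
          left; exact ⟨hxch, hm⟩
        · intro hw
          simp only [w2, Bool.or_eq_true, Bool.and_eq_true, decide_eq_true_eq, List.contains_iff_mem] at hw
          rcases hw with ⟨_, hm⟩ | hw
          · exact hm
          · exact w2_imp_mem ch xs hw

theorem solution_spec : Claim_equal_solution := by
  intro s _
  unfold Spec_solution
  simp only [solution, solution_alt]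
  rw [outer_loop s.toList, List.nil_append, runs_fold s.toList [] none, List.nil_append]
  obtain ⟨h1, h2, h3⟩ := sm_fold (runsRec none s.toList)
  have hmemA : ∀ x, x ∈ (PySem.List.sorted (PySem.Set.ofList s.toList) (fun x => x) false).filter
      (fun ch => w1 ch s.toList) ↔ w1 x s.toList = true := by
    intro x
    rw [List.mem_filter, PySem.List.mem_sorted, PySem.Set.mem_ofList]
    exact ⟨fun h => h.2, fun h => ⟨w1_imp_mem x s.toList h, h⟩⟩
  have hpairA : ((PySem.List.sorted (PySem.Set.ofList s.toList) (fun x => x) false).filter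
      (fun ch => w1 ch s.toList)).Pairwise (· < ·) :=
    List.Pairwise.filter _ (PySem.List.sorted_ofList_pairwise_lt s.toList)
  have hnodupA : ((PySem.List.sorted (PySem.Set.ofList s.toList) (fun x => x) false).filter
      (fun ch => w1 ch s.toList)).Nodup := hpairA.imp ne_of_lt
  have hperm : ((PySem.List.sorted (PySem.Set.ofList s.toList) (fun x => x) false).filter
      (fun ch => w1 ch s.toList)).Perm
      ((runsRec none s.toList).foldl (fun (st : PySem.Set Char × PySem.Set Char) ch =>
        if PySem.Set.contains st.1 ch then (st.1, PySem.Set.add st.2 ch)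
        else (PySem.Set.add st.1 ch, st.2)) (PySem.Set.empty, PySem.Set.empty)).2 :=
    (List.perm_ext_iff_of_nodup hnodupA h2).mpr (by
      intro a
      rw [hmemA a, h3 a, ← ((wcnt a s.toList).1 none (by simp)).1])
  rw [PySem.List.sorted_eq_of_perm_of_pairwise_lt _ _ _ hperm hpairA]
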